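-- pv_equiv track=rewrite | github.com/openstack/charm-glance-simplestreams-sync | files/glance_simplestreams_sync.py | redact_keys
-- ===== SOURCE A (Python) =====
-- import copy
--
-- def redact_keys(data_dict, key_list=None):
--     """Return a dict with top-level keys having redacted values."""
--     if not key_list:
--         key_list = [
--             'admin',
--             'password',
--             'rabbit_password',
--             'admin_password',
--         ]
--
--     _data = copy.deepcopy(data_dict)
--     for _key in key_list:
--         if _key in _data.keys():
--             _data[_key] = '<redacted>'
--     return _data
-- ===== SOURCE B (Python) =====
-- import copy
--
-- def redact_keys(data_dict, key_list=None):
--     """Return a dict with top-level keys having redacted values."""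
--     redacted = set(key_list or ['admin', 'password', 'rabbit_password', 'admin_password'])
--     return {k: ('<redacted>' if k in redacted else copy.deepcopy(v))
--             for k, v in data_dict.items()}
-- ===== Notes on version B (the rewrite author's own statement) =====
-- stated objective: simpler
-- what changed: Instead of deepcopying the whole dict and then scanning the key list with an in-place update per hit, B builds the result in one pass over data_dict.items(), testing each key against a set of redaction keys and deepcopying only the kept values.
import Mathlib
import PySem

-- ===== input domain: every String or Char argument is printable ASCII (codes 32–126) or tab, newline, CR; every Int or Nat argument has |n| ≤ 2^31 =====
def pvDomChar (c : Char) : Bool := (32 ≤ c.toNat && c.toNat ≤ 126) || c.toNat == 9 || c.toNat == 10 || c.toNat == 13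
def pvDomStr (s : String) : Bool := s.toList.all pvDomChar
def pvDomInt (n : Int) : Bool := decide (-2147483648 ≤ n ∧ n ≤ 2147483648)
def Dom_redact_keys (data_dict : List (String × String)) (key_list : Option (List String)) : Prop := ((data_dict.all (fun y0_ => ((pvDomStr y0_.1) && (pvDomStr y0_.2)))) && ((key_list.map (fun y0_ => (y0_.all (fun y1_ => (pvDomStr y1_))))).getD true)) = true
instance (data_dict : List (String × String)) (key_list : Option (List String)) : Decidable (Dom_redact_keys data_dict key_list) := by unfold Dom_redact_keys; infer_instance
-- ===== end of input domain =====

-- B rebuilds the dict in one pass over the data entries (set-membership per key) instead of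
-- deepcopying the whole dict and updating it in place per key-list entry; objective: simpler.

-- ===== PORT A =====
-- default key list (the literal from A)
def pvDefaultKeys : List String := ["admin", "password", "rabbit_password", "admin_password"]

-- Python dict assignment `_data[_key] = v`: replace the value at the first matching key in place
def pvSetKey (l : List (String × String)) (k v : String) : List (String × String) :=
  match l with
  | [] => []
  | (k', v') :: t => if k' = k then (k', v) :: t else (k', v') :: pvSetKey t k v

def redact_keys (data_dict : List (String × String)) (key_list : Option (List String)) : List (String × String) :=
  -- `if not key_list:` — None or empty list selects the default
  let kl := match key_list with
    | none => pvDefaultKeys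
    | some l => if l.isEmpty then pvDefaultKeys else l
  -- _data = copy.deepcopy(data_dict); values are strings, so the copy is the list itself
  -- for _key in key_list: if _key in _data.keys(): _data[_key] = '<redacted>'
  kl.foldl (fun _data _key =>
    if _key ∈ _data.map Prod.fst then pvSetKey _data _key "<redacted>" else _data) data_dict

-- ===== PORT B =====
def redact_keys_alt (data_dict : List (String × String)) (key_list : Option (List String)) : List (String × String) :=
  -- redacted = set(key_list or [...defaults...])
  let redacted : PySem.Set String := PySem.Set.ofList
    (match key_list with
     | none => pvDefaultKeys
     | some l => if l.isEmpty then pvDefaultKeys else l)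
  -- {k: ('<redacted>' if k in redacted else deepcopy(v)) for k, v in data_dict.items()}
  data_dict.map (fun kv => (kv.1, if kv.1 ∈ redacted then "<redacted>" else kv.2))

-- ===== PRECONDITION & SPEC =====
-- Pre_ admits exactly the association lists that represent a Python dict (no duplicate keys);
-- a duplicate-keyed list corresponds to no dict input of A.
def Pre_redact_keys (data_dict : List (String × String)) (key_list : Option (List String)) : Prop :=
  (data_dict.map Prod.fst).Nodup
instance (data_dict : List (String × String)) (key_list : Option (List String)) : Decidable (Pre_redact_keys data_dict key_list) := by unfold Pre_redact_keys; infer_instance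
def pvWitness_redact_keys : (List (String × String)) × Option (List String) :=
  ([("password", "s3cret"), ("host", "10.0.0.1")], none)

def Spec_redact_keys (data_dict : List (String × String)) (key_list : Option (List String)) (out : List (String × String)) : Prop := out = redact_keys_alt data_dict key_list
instance (data_dict : List (String × String)) (key_list : Option (List String)) (out : List (String × String)) : Decidable (Spec_redact_keys data_dict key_list out) := by unfold Spec_redact_keys; infer_instance

-- ===== CLAIM (what is proved, stated in full; the proofs are below) =====
def Claim_equal_redact_keys : Prop := ∀ (data_dict : List (String × String)) (key_list : Option (List String)), Dom_redact_keys data_dict key_list → Pre_redact_keys data_dict key_list → Spec_redact_keys data_dict key_list (redact_keys data_dict key_list)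

-- ===== LEMMAS AND PROOFS =====

-- ===== VERDICT (by name: the statement is the Claim_ definition above) =====
-- pointwise update of a single key, as a map
def pvSingle (k : String) (kv : String × String) : String × String :=
  if kv.1 = k then (kv.1, "<redacted>") else kv

theorem pvMap_single_absent (l : List (String × String)) (k : String)
    (h : k ∉ l.map Prod.fst) : l.map (pvSingle k) = l := by
  induction l with
  | nil => rfl
  | cons hd t ih =>
    simp only [List.map_cons, List.mem_cons, not_or] at h
    simp [pvSingle, Ne.symm h.1, ih h.2]

theorem pvSetKey_eq_map (l : List (String × String)) (k : String)
    (h : (l.map Prod.fst).Nodup) :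
    pvSetKey l k "<redacted>" = l.map (pvSingle k) := by
  induction l with
  | nil => rfl
  | cons hd t ih =>
    simp only [List.map_cons, List.nodup_cons] at h
    by_cases hk : hd.1 = k
    · subst hk
      simp [pvSetKey, pvSingle, pvMap_single_absent t hd.1 h.1]
    · simp [pvSetKey, pvSingle, hk, ih h.2]

theorem pvStep_eq_map (l : List (String × String)) (k : String)
    (h : (l.map Prod.fst).Nodup) :
    (if k ∈ l.map Prod.fst then pvSetKey l k "<redacted>" else l) = l.map (pvSingle k) := by
  by_cases hk : k ∈ l.map Prod.fst
  · simp [hk, pvSetKey_eq_map l k h]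
  · simp [hk, pvMap_single_absent l k hk]

theorem pvKeys_map_single (l : List (String × String)) (k : String) :
    (l.map (pvSingle k)).map Prod.fst = l.map Prod.fst := by
  induction l with
  | nil => rfl
  | cons hd t ih => by_cases hk : hd.1 = k <;> simp [pvSingle, hk, ih]

theorem pvFoldl_eq_map (kl : List String) (l : List (String × String))
    (h : (l.map Prod.fst).Nodup) :
    kl.foldl (fun _data _key =>
        if _key ∈ _data.map Prod.fst then pvSetKey _data _key "<redacted>" else _data) l
      = l.map (fun kv => (kv.1, if kv.1 ∈ kl then "<redacted>" else kv.2)) := by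
  induction kl generalizing l with
  | nil => simp
  | cons k rest ih =>
    have h' : ((l.map (pvSingle k)).map Prod.fst).Nodup := by
      rw [pvKeys_map_single]; exact h
    simp only [List.foldl_cons, pvStep_eq_map l k h, ih (l.map (pvSingle k)) h']
    rw [List.map_map]
    apply List.map_congr_left
    intro kv _
    by_cases hk : kv.1 = k <;> simp [pvSingle, hk, List.mem_cons]

theorem redact_keys_spec : Claim_equal_redact_keys := by
  intro data_dict key_list _ hpre
  unfold Spec_redact_keys redact_keys redact_keys_alt
  rw [pvFoldl_eq_map _ data_dict hpre]
  apply List.map_congr_left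
  intro kv _
  congr 1
  simp [PySem.Set.mem_ofList]
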